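-- pv_equiv track=rewrite | github.com/APrioriInvestments/typed_python | typed_python/compiler/type_wrappers/min_max_wrapper.py | i_max_default
-- ===== SOURCE A (Python) =====
-- def i_max_default(v, default):
--     first = 1
--     for e in v:
--         if first or e > ret:  # noqa: F821
--             first = 0
--             ret = e
--     if first:
--         return default
--     return ret
-- ===== SOURCE B (Python) =====
-- def i_max_default(v, default):
--     if not v:
--         return default
--     if len(v) == 1:
--         return v[0]
--     m = len(v) // 2
--     a = i_max_default(v[:m], default)
--     b = i_max_default(v[m:], default)
--     return a if a > b else b
-- ===== Notes on version B (the rewrite author's own statement) =====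
-- stated objective: alternative
-- what changed: Replaces A's single-pass loop with a per-iteration 'first' sentinel by a recursive divide-and-conquer: split the list in halves, take the maximum of each half recursively, and combine; the empty list returns default at the top.
import Mathlib
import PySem

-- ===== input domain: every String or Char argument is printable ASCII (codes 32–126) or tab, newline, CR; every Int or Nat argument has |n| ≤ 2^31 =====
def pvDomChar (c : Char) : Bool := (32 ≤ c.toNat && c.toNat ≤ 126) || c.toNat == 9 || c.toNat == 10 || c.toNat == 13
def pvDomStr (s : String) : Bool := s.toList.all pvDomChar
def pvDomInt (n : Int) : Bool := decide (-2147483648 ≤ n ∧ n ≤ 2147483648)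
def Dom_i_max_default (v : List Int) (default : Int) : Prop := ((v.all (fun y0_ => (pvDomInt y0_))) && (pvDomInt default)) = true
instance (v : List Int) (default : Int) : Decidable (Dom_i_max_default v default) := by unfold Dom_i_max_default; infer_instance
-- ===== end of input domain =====

-- B replaces A's single-pass sentinel loop by a recursive divide-and-conquer over list halves (alternative decomposition, not faster).

-- ===== PORT A =====
-- state: (first, ret); ret is read only when first = 0 (initial 0 is a dummy, never observed)
def i_max_default (v : List Int) (default : Int) : Int :=
  let s := v.foldl (fun (s : Int × Int) e => if s.1 ≠ 0 ∨ e > s.2 then (0, e) else s) (1, 0)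
  if s.1 ≠ 0 then default else s.2

-- ===== PORT B =====
def i_max_default_alt (v : List Int) (default : Int) : Int :=
  match v with
  | [] => default
  | [x] => x
  | x :: y :: rest =>
    let m := (x :: y :: rest).length / 2
    let a := i_max_default_alt (PySem.List.slice (x :: y :: rest) none (some (m : Int))) default
    let b := i_max_default_alt (PySem.List.slice (x :: y :: rest) (some (m : Int)) none) default
    if a > b then a else b
termination_by v.length
decreasing_by
  · simp only [PySem.List.slice_to_natCast, List.length_take, List.length_cons]
    omega
  · simp only [PySem.List.slice_from_natCast, List.length_drop, List.length_cons]
    omega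

-- ===== PRECONDITION & SPEC =====
def Spec_i_max_default (v : List Int) (default : Int) (out : Int) : Prop := out = i_max_default_alt v default
instance (v : List Int) (default : Int) (out : Int) : Decidable (Spec_i_max_default v default out) := by unfold Spec_i_max_default; infer_instance

-- ===== CLAIM (what is proved, stated in full; the proofs are below) =====
def Claim_equal_i_max_default : Prop := ∀ (v : List Int) (default : Int), Dom_i_max_default v default → Spec_i_max_default v default (i_max_default v default)

-- ===== LEMMAS AND PROOFS =====

-- A's loop step is just `max`
theorem pv_step_eq_max (r e : Int) : (if e > r then e else r) = max r e := by
  rcases le_or_gt e r with h | h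
  · simp [max_eq_left h, not_lt.mpr h]
  · simp [max_eq_right h.le, h]

theorem pv_foldl_max_max (t : List Int) (a b : Int) :
    t.foldl max (max a b) = max a (t.foldl max b) := by
  induction t generalizing b with
  | nil => rfl
  | cons c t ih =>
    simp only [List.foldl, max_assoc, ih]

theorem pv_foldl_max_append (t1 : List Int) (h1 h2 : Int) (t2 : List Int) :
    (t1 ++ h2 :: t2).foldl max h1 = max (t1.foldl max h1) (t2.foldl max h2) := by
  rw [List.foldl_append]
  simp only [List.foldl]
  rw [pv_foldl_max_max]

-- B computes the head-seeded fold of max over the tail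
theorem pv_alt_eq_fold (v : List Int) (default : Int) (h : Int) (t : List Int)
    (hv : v = h :: t) : i_max_default_alt v default = t.foldl max h := by
  induction hn : v.length using Nat.strong_induction_on generalizing v h t with
  | _ n ih =>
  subst hv
  match t with
  | [] => simp [i_max_default_alt]
  | t0 :: ts =>
    rw [i_max_default_alt]
    have hlen : (h :: t0 :: ts).length = ts.length + 2 := by simp
    set m : Nat := (h :: t0 :: ts).length / 2 with hm
    have hm1 : 1 ≤ m := by omega
    have hmlt : m < (h :: t0 :: ts).length := by omega
    simp only [PySem.List.slice_to_natCast, PySem.List.slice_from_natCast]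
    set l1 := (h :: t0 :: ts).take m with hl1
    set l2 := (h :: t0 :: ts).drop m with hl2
    have hsplit : l1 ++ l2 = h :: t0 :: ts := List.take_append_drop m _
    have hlen1 : l1.length = m := by
      rw [hl1, List.length_take]; omega
    have hlen2 : l2.length = (h :: t0 :: ts).length - m := by
      rw [hl2, List.length_drop]
    -- l1 = h :: t1' for some t1'
    obtain ⟨t1', hl1e⟩ : ∃ t1', l1 = h :: t1' := by
      rw [hl1]
      cases hmc : m with
      | zero => omega
      | succ k => exact ⟨(t0 :: ts).take k, by simp⟩
    obtain ⟨h2, t2', hl2e⟩ : ∃ h2 t2', l2 = h2 :: t2' := by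
      cases hc : l2 with
      | nil => rw [hc] at hlen2; simp at hlen2; omega
      | cons x xs => exact ⟨x, xs, rfl⟩
    have ha := ih l1.length (by omega) l1 h t1' hl1e rfl
    have hb := ih l2.length (by omega) l2 h2 t2' hl2e rfl
    rw [ha, hb]
    have htail : t1' ++ h2 :: t2' = t0 :: ts := by
      have := hsplit
      rw [hl1e, hl2e] at this
      simpa using this
    rw [← htail, pv_foldl_max_append]
    rw [pv_step_eq_max, max_comm]

-- ===== VERDICT (by name: the statement is the Claim_ definition above) =====
theorem i_max_default_spec : Claim_equal_i_max_default := by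
  intro v default _
  unfold Spec_i_max_default
  cases v with
  | nil => simp [i_max_default, i_max_default_alt]
  | cons h t =>
    rw [pv_alt_eq_fold (h :: t) default h t rfl]
    unfold i_max_default
    simp only [List.foldl]
    rw [if_pos (Or.inl one_ne_zero)]
    have : ∀ (l : List Int) (r : Int),
        l.foldl (fun (s : Int × Int) e => if s.1 ≠ 0 ∨ e > s.2 then (0, e) else s) (0, r)
          = (0, l.foldl max r) := by
      intro l
      induction l with
      | nil => intro r; rfl
      | cons e l ih =>
        intro r
        simp only [List.foldl]
        by_cases hc : e > r
        · rw [if_pos (Or.inr hc), ih, max_eq_right hc.le]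
        · rw [if_neg (by simp [hc]), ih, max_eq_left (not_lt.mp hc)]
    rw [this]
    simp
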